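-- pv_equiv track=rewrite | github.com/endre095/CSCI_1913_Assignments_And_Labs | Misc assignments/count_coins.py | count_coins
-- ===== SOURCE A (Python) =====
-- def count_coins(list):
--     counted_coins = {"pennies": 0,
--                      "quarters": 0,
--                      "dimes": 0,
--                      "nickels": 0
--                      }
--     for num in list:
--         if num == 25:
--             counted_coins["quarters"] += 1
--         if num == 10:
--             counted_coins["dimes"] += 1
--         if num == 5:
--             counted_coins["nickels"] += 1
--         if num == 1:
--             counted_coins["pennies"] += 1
--     return counted_coins
-- ===== SOURCE B (Python) =====
-- def count_coins(list):
--     return {"pennies": list.count(1),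
--             "quarters": list.count(25),
--             "dimes": list.count(10),
--             "nickels": list.count(5)}
-- ===== Notes on version B (the rewrite author's own statement) =====
-- stated objective: idiomatic
-- what changed: Replaced the single accumulating loop over a mutable dict with a dict literal whose four values are independent list.count scans, one per denomination.
import Mathlib
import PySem

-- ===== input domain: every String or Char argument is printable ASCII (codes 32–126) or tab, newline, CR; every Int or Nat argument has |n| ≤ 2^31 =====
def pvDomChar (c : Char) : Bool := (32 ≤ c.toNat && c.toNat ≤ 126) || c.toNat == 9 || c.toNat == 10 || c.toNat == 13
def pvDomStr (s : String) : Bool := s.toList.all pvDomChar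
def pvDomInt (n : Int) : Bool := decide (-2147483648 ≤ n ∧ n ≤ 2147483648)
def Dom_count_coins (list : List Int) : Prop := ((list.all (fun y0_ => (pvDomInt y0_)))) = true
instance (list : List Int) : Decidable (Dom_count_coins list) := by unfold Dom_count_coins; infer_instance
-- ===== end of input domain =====

-- B replaces A's single accumulating loop over a mutable dict by a dict literal of four independent list.count scans (idiomatic).

-- ===== PORT A =====
-- loop body of A (one iteration of 'for num in list', branches in source order)
def count_coins_step (d : PySem.Dict String Int) (num : Int) : PySem.Dict String Int :=
  let d := if num == 25 then d.modify "quarters" 0 (· + 1) else d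
  let d := if num == 10 then d.modify "dimes" 0 (· + 1) else d
  let d := if num == 5 then d.modify "nickels" 0 (· + 1) else d
  let d := if num == 1 then d.modify "pennies" 0 (· + 1) else d
  d

def count_coins (list : List Int) : List (String × Int) :=
  let counted_coins : PySem.Dict String Int :=
    PySem.Dict.ofList [("pennies", 0), ("quarters", 0), ("dimes", 0), ("nickels", 0)]
  let counted_coins := list.foldl count_coins_step counted_coins
  counted_coins.items

-- ===== PORT B =====
def count_coins_alt (list : List Int) : List (String × Int) :=
  [("pennies", (PySem.List.count list 1 : Int)),
   ("quarters", (PySem.List.count list 25 : Int)),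
   ("dimes", (PySem.List.count list 10 : Int)),
   ("nickels", (PySem.List.count list 5 : Int))]

-- ===== PRECONDITION & SPEC =====
def Spec_count_coins (list : List Int) (out : List (String × Int)) : Prop := out = count_coins_alt list
instance (list : List Int) (out : List (String × Int)) : Decidable (Spec_count_coins list out) := by unfold Spec_count_coins; infer_instance

-- ===== CLAIM (what is proved, stated in full; the proofs are below) =====
def Claim_equal_count_coins : Prop := ∀ (list : List Int), Dom_count_coins list → Spec_count_coins list (count_coins list)

-- ===== LEMMAS AND PROOFS =====

theorem count_coins_step_eq (x p q r st : Int) :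
    count_coins_step (PySem.Dict.mk [("pennies", p), ("quarters", q), ("dimes", r), ("nickels", st)]) x =
    PySem.Dict.mk [("pennies", p + if x = 1 then 1 else 0),
                   ("quarters", q + if x = 25 then 1 else 0),
                   ("dimes", r + if x = 10 then 1 else 0),
                   ("nickels", st + if x = 5 then 1 else 0)] := by
  simp only [count_coins_step, beq_iff_eq]
  split_ifs <;> simp_all [PySem.Dict.modify, PySem.Dict.contains, PySem.Dict.get?,
    PySem.Dict.insert, PySem.Dict.getD]

theorem count_coins_fold (l : List Int) (a b c e : Int) :
    (l.foldl count_coins_step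
      (PySem.Dict.mk [("pennies", a), ("quarters", b), ("dimes", c), ("nickels", e)])) =
    PySem.Dict.mk [("pennies", a + l.count 1), ("quarters", b + l.count 25),
                   ("dimes", c + l.count 10), ("nickels", e + l.count 5)] := by
  induction l generalizing a b c e with
  | nil => simp
  | cons x xs ih =>
    rw [List.foldl_cons, count_coins_step_eq, ih]
    simp [List.count_cons]
    split_ifs <;> simp_all <;> ring_nf <;> omega

theorem count_coins_spec : Claim_equal_count_coins := by
  intro l _
  unfold Spec_count_coins count_coins count_coins_alt
  simp only []
  rw [show (PySem.Dict.ofList [("pennies", (0:Int)), ("quarters", 0), ("dimes", 0), ("nickels", 0)]) =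
      PySem.Dict.mk [("pennies", 0), ("quarters", 0), ("dimes", 0), ("nickels", 0)] from by decide]
  rw [count_coins_fold]
  simp [PySem.List.count]
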